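-- pv_equiv track=rewrite | github.com/rebeccaebarnes/DAND-Project-2 | bikeshare.py | info_type
-- ===== SOURCE A (Python) =====
-- def info_type(data, key):
--     '''Finds the types of elements and their counts in data[key].
--     Args:
--         list of dictionaries with specified key.
--     Returns:
--         sorted list of ((str) info type, (int) count).
--     '''
--     # Create list of items in key
--     info_list = [element[key] for element in data]
--     # Create dict with items in data as the key and key count as the value
--     count_dict = dict()
--     for item in info_list:
--         count_dict[item] = count_dict.get(item, 0) + 1
--     elements = [element for element in count_dict]
--     count = [count_dict[element] for element in count_dict]
--     count_list = sorted(list(zip(elements, count)))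
--     return count_list
-- ===== SOURCE B (Python) =====
-- def info_type(data, key):
--     '''Finds the types of elements and their counts in data[key].
--
--     Sort the extracted values once, then emit (value, count) pairs by
--     counting runs of equal values in a single pass; the result is already
--     in sorted order.
--     '''
--     vals = sorted(element[key] for element in data)
--     count_list = []
--     i = 0
--     n = len(vals)
--     while i < n:
--         j = i + 1
--         while j < n and vals[j] == vals[i]:
--             j += 1
--         count_list.append((vals[i], j - i))
--         i = j
--     return count_list
-- ===== Notes on version B (the rewrite author's own statement) =====
-- stated objective: alternative
-- what changed: Replaces A's hash-count-then-sort-the-pairs with sort-all-values-then-count-consecutive-runs in one grouping pass, so the sorted result falls out of the grouping with no final sort of pairs.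
import Mathlib
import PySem

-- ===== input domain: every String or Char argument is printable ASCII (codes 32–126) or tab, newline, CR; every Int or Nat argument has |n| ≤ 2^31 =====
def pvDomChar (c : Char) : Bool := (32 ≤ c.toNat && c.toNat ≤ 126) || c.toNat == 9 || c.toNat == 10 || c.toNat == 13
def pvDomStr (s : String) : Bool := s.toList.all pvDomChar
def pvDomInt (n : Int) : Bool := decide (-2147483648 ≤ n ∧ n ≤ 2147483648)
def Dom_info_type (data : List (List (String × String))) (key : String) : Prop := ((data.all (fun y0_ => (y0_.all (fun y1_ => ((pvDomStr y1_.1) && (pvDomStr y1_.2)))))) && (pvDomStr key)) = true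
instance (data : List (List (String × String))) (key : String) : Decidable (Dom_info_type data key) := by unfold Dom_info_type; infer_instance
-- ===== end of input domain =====

-- B changes the algorithm (sort the values once, count consecutive runs) rather than hash-count then sort the pairs; same cost class, no speed claim.

-- ===== PORT A =====
-- element[key] (KeyError when key absent — excluded by Pre_info_type below)
def pvLookup (element : List (String × String)) (key : String) : String :=
  ((PySem.Dict.mk element).get? key).getD ""

def info_type (data : List (List (String × String))) (key : String) : List (String × Int) :=
  let info_list := data.map (fun element => pvLookup element key)
  let count_dict := info_list.foldl
    (fun d item => d.insert item (d.getD item 0 + 1)) PySem.Dict.empty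
  let elements := count_dict.keys
  let count := count_dict.keys.map (fun element => count_dict.getD element 0)
  PySem.List.sorted2 (elements.zip count) (fun p => p.1) (fun p => p.2) false

-- ===== PORT B =====
-- B's outer while loop over runs; the inner 'while vals[j] == vals[i]' scan is the takeWhile/dropWhile split
def groupRuns : List String → List (String × Int)
  | [] => []
  | v :: rest =>
      (v, 1 + (rest.takeWhile (fun x => x == v)).length) ::
        groupRuns (rest.dropWhile (fun x => x == v))
  termination_by l => l.length
  decreasing_by
    simpa using Nat.lt_succ_of_le (List.length_dropWhile_le _ _)

def info_type_alt (data : List (List (String × String))) (key : String) : List (String × Int) :=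
  let vals := data.map (fun element => pvLookup element key)
  groupRuns (PySem.List.sorted vals (fun x => x) false)

-- ===== PRECONDITION & SPEC =====
-- exactly the inputs on which Python A returns: element[key] must not raise KeyError
def Pre_info_type (data : List (List (String × String))) (key : String) : Prop :=
  ∀ element ∈ data, (PySem.Dict.mk element).contains key = true
instance (data : List (List (String × String))) (key : String) : Decidable (Pre_info_type data key) := by
  unfold Pre_info_type; infer_instance

def pvWitness_info_type : (List (List (String × String))) × String :=
  ([[("a", "x")], [("a", "y")], [("a", "x")]], "a")

def Spec_info_type (data : List (List (String × String))) (key : String) (out : List (String × Int)) : Prop := out = info_type_alt data key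
instance (data : List (List (String × String))) (key : String) (out : List (String × Int)) : Decidable (Spec_info_type data key out) := by unfold Spec_info_type; infer_instance

-- ===== CLAIM (what is proved, stated in full; the proofs are below) =====
def Claim_equal_info_type : Prop := ∀ (data : List (List (String × String))) (key : String), Dom_info_type data key → Pre_info_type data key → Spec_info_type data key (info_type data key)

-- ===== LEMMAS AND PROOFS =====

lemma insertBy_congr {α : Type} (f g : α → α → Bool) (x : α) (ys : List α)
    (h : ∀ y ∈ ys, f x y = g x y) :
    PySem.List.insertBy f x ys = PySem.List.insertBy g x ys := by
  induction ys with
  | nil => rfl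
  | cons y ys ih =>
    simp only [PySem.List.insertBy, h y (by simp)]
    split <;> simp [ih (fun z hz => h z (by simp [hz]))]

lemma foldl_insertBy_congr {α : Type} (f g : α → α → Bool) :
    ∀ (xs acc : List α),
      (∀ a b : α, (a ∈ xs ∨ a ∈ acc) → (b ∈ xs ∨ b ∈ acc) → f a b = g a b) →
      xs.foldl (fun acc x => PySem.List.insertBy f x acc) acc =
      xs.foldl (fun acc x => PySem.List.insertBy g x acc) acc := by
  intro xs
  induction xs with
  | nil => intro acc h; rfl
  | cons x xs ih =>
    intro acc h
    simp only [List.foldl_cons]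
    rw [insertBy_congr f g x acc (fun y hy => h x y (Or.inl (by simp)) (Or.inr hy))]
    exact ih _ (fun a b ha hb => by
      apply h a b
      · rcases ha with ha | ha
        · exact Or.inl (by simp [ha])
        · rcases (PySem.List.mem_insertBy g x a acc).1 ha with h' | h'
          · exact Or.inl (by simp [h'])
          · exact Or.inr h'
      · rcases hb with hb | hb
        · exact Or.inl (by simp [hb])
        · rcases (PySem.List.mem_insertBy g x b acc).1 hb with h' | h'
          · exact Or.inl (by simp [h'])
          · exact Or.inr h')

-- Python's lexicographic tuple sort equals sorting by the first component when first components are distinct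
lemma sorted2_eq_sorted_fst (xs : List (String × Int))
    (hinj : ∀ a ∈ xs, ∀ b ∈ xs, a.1 = b.1 → a = b) :
    PySem.List.sorted2 xs (fun p => p.1) (fun p => p.2) false =
    PySem.List.sorted xs (fun p => p.1) false := by
  rw [PySem.List.sorted_eq_foldl_insertBy]
  show xs.foldl (fun acc x => PySem.List.insertBy
      (fun a b => decide (a.1 < b.1) || (!decide (b.1 < a.1) && decide (a.2 < b.2))) x acc) []
    = _
  apply foldl_insertBy_congr
  intro a b ha hb
  simp only [List.mem_nil_iff, or_false] at ha hb
  rcases lt_trichotomy a.1 b.1 with h | h | h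
  · simp [h, not_lt_of_gt h]
  · have : a = b := hinj a ha b hb h
    subst this
    simp
  · simp [h, not_lt_of_gt h]

-- run-grouping a (≤)-sorted list: every emitted pair carries its value's count,
-- the emitted keys are exactly the list's values, and keys strictly increase
lemma groupRuns_spec : ∀ (n : Nat) (l : List String), l.length ≤ n → l.Pairwise (· ≤ ·) →
    (∀ p ∈ groupRuns l, p.1 ∈ l ∧ p.2 = (l.count p.1 : Int)) ∧
    (∀ x ∈ l, x ∈ (groupRuns l).map Prod.fst) ∧
    (groupRuns l).Pairwise (fun a b => a.1 < b.1) := by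
  intro n
  induction n with
  | zero =>
    intro l hn _
    have : l = [] := List.eq_nil_of_length_eq_zero (Nat.le_zero.1 hn)
    subst this
    simp [groupRuns]
  | succ n ih =>
    intro l hn hl
    match l with
    | [] => simp [groupRuns]
    | v :: rest =>
      have hle : ∀ x ∈ rest, v ≤ x := fun x hx => (List.pairwise_cons.1 hl).1 x hx
      have hrp : rest.Pairwise (· ≤ ·) := (List.pairwise_cons.1 hl).2
      set run := rest.takeWhile (fun x => x == v) with hrun_def
      set rest' := rest.dropWhile (fun x => x == v) with hrest'_def
      have hsplit : run ++ rest' = rest := List.takeWhile_append_dropWhile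
      have hrunv : ∀ x ∈ run, x = v := by
        intro x hx
        have := List.mem_takeWhile_imp hx
        simpa using this
      have hlt : ∀ x ∈ rest', v < x := by
        intro x hx
        cases hx' : rest' with
        | nil => simp [hx'] at hx
        | cons z t =>
          have hz : ¬ (z == v) = true := by
            have := List.head_dropWhile_not (fun x => x == v) (l := rest)
              (by simp [← hrest'_def, hx'])
            simpa [← hrest'_def, hx'] using this
          have hzv : z ≠ v := by simpa using hz
          have hzr : z ∈ rest := by
            rw [← hsplit]; simp [hx']
          have hvz : v < z := lt_of_le_of_ne (hle z hzr) (Ne.symm hzv)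
          rw [hx'] at hx
          rcases List.mem_cons.1 hx with h | h
          · exact h ▸ hvz
          · have hzt : ∀ y ∈ t, z ≤ y := by
              have : (z :: t).Pairwise (· ≤ ·) := by
                rw [← hx']
                exact hrp.sublist (List.dropWhile_sublist _)
              exact fun y hy => (List.pairwise_cons.1 this).1 y hy
            exact lt_of_lt_of_le hvz (hzt x h)
      have hnv : v ∉ rest' := fun h => lt_irrefl v (hlt v h)
      have hr'p : rest'.Pairwise (· ≤ ·) := hrp.sublist (List.dropWhile_sublist _)
      have hr'n : rest'.length ≤ n := by
        have h1 : rest'.length ≤ rest.length := List.length_dropWhile_le _ _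
        have h2 : rest.length + 1 ≤ n + 1 := by simpa using hn
        omega
      obtain ⟨ih1, ih2, ih3⟩ := ih rest' hr'n hr'p
      have hcount : (v :: rest).count v = 1 + run.length := by
        have h1 : run.count v = run.length :=
          List.count_eq_length.2 (fun x hx => ((hrunv x hx) ▸ rfl : v = x))
        have h2 : rest'.count v = 0 := List.count_eq_zero.2 hnv
        rw [← hsplit]
        simp [List.count_append, h1, h2, Nat.add_comm]
      have hcount' : ∀ x, x ≠ v → (v :: rest).count x = rest'.count x := by
        intro x hxv
        have h1 : run.count x = 0 := List.count_eq_zero.2 (fun h => hxv (hrunv x h))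
        rw [← hsplit]
        simp [List.count_append, h1, Ne.symm hxv]
      refine ⟨?_, ?_, ?_⟩
      · intro p hp
        rw [groupRuns] at hp
        rcases List.mem_cons.1 hp with h | h
        · subst h
          refine ⟨by simp, ?_⟩
          simp only [hcount]
          push_cast
          ring
        · obtain ⟨hmem, hcnt⟩ := ih1 p h
          have hpv : p.1 ≠ v := fun he => hnv (he ▸ hmem)
          refine ⟨?_, ?_⟩
          · rw [← hsplit]
            simp [hmem]
          · rw [hcnt, hcount' p.1 hpv]
      · intro x hx
        rw [groupRuns]
        rcases List.mem_cons.1 hx with h | h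
        · simp [h]
        · rw [← hsplit] at h
          rcases List.mem_append.1 h with h | h
          · simp [hrunv x h]
          · have := ih2 x h
            simp at this ⊢
            tauto
      · rw [groupRuns]
        refine List.pairwise_cons.2 ⟨?_, ih3⟩
        intro p hp
        exact hlt p.1 (ih1 p hp).1

-- every pair emitted by groupRuns of the sorted values is (key, count of that key in vals)
lemma groupRuns_canonical (vals : List String) :
    groupRuns (PySem.List.sorted vals (fun x => x) false) =
      (groupRuns (PySem.List.sorted vals (fun x => x) false)).map
        (fun p => (p.1, (vals.count p.1 : Int))) := by
  set L := PySem.List.sorted vals (fun x => x) false with hL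
  have hperm : L.Perm vals := PySem.List.sorted_perm vals (fun x => x) false
  have hpw : L.Pairwise (· ≤ ·) := by
    simpa using PySem.List.sorted_pairwise vals (fun x => x)
  obtain ⟨h1, -, -⟩ := groupRuns_spec L.length L (le_refl _) hpw
  conv_lhs => rw [← List.map_id (groupRuns L)]
  apply List.map_congr_left
  intro p hp
  obtain ⟨-, hcnt⟩ := h1 p hp
  have hc : L.count p.1 = vals.count p.1 := hperm.count_eq p.1
  simp only [id]
  rw [← Prod.mk.eta (p := p), hcnt, hc]

-- ===== VERDICT (by name: the statement is the Claim_ definition above) =====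
theorem info_type_spec : Claim_equal_info_type := by
  intro data key _ _
  unfold Spec_info_type info_type info_type_alt
  simp only []
  set vals := data.map (fun element => pvLookup element key) with hvals
  -- A's counting loop is Counter(vals)
  rw [PySem.Dict.foldl_insert_getD_add_one_eq_counter]
  -- the keys zipped with their looked-up counts are exactly the items
  have hzip : (PySem.Dict.counter vals).keys.zip
      ((PySem.Dict.counter vals).keys.map (fun e => (PySem.Dict.counter vals).getD e 0)) =
      (PySem.Dict.counter vals).items := by
    rw [← List.map_prod_left_eq_zip, PySem.Dict.keys_counter, PySem.Dict.items_counter]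
    exact List.map_congr_left fun k _ => by rw [PySem.Dict.getD_counter]
  rw [hzip, PySem.Dict.items_counter]
  set items := (PySem.Set.ofList vals).map (fun k => (k, (vals.count k : Int))) with hitems
  have hkeysnd : ((PySem.Set.ofList vals : List String)).Nodup := PySem.Set.nodup_ofList vals
  have hmapfst : (items.map Prod.fst) = (PySem.Set.ofList vals : List String) := by
    simp [hitems, List.map_map, Function.comp_def]
  have hinj : ∀ a ∈ items, ∀ b ∈ items, a.1 = b.1 → a = b :=
    fun a ha b hb h =>
      List.inj_on_of_nodup_map (f := Prod.fst) (l := items) (hmapfst ▸ hkeysnd) ha hb h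
  rw [sorted2_eq_sorted_fst items hinj]
  -- B's result is a strictly-key-increasing rearrangement of the items
  set L := PySem.List.sorted vals (fun x => x) false with hL
  have hperm : L.Perm vals := PySem.List.sorted_perm vals (fun x => x) false
  have hpw : L.Pairwise (· ≤ ·) := by
    simpa using PySem.List.sorted_pairwise vals (fun x => x)
  obtain ⟨h1, h2, h3⟩ := groupRuns_spec L.length L (le_refl _) hpw
  have hGnodup : ((groupRuns L).map Prod.fst).Nodup :=
    (List.pairwise_map.2 h3).imp ne_of_lt
  have hfstperm : ((groupRuns L).map Prod.fst).Perm (PySem.Set.ofList vals : List String) := by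
    apply List.perm_of_nodup_nodup_toFinset_eq hGnodup hkeysnd
    ext x
    simp only [List.mem_toFinset, List.mem_map]
    constructor
    · rintro ⟨p, hp, rfl⟩
      have hx : p.1 ∈ vals := hperm.mem_iff.1 (h1 p hp).1
      simpa [PySem.Set.mem_ofList] using hx
    · intro hx
      have hxv : x ∈ vals := by simpa [PySem.Set.mem_ofList] using hx
      have := h2 x (hperm.mem_iff.2 hxv)
      simpa using this
  have hGperm : (groupRuns L).Perm items := by
    have hmp := hfstperm.map (fun k => (k, (vals.count k : Int)))
    rw [← hitems] at hmp
    rw [List.map_map] at hmp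
    have hc := groupRuns_canonical vals
    rw [← hL] at hc
    have : ((groupRuns L).map ((fun k => (k, (vals.count k : Int))) ∘ Prod.fst)) =
        (groupRuns L).map (fun p => (p.1, (vals.count p.1 : Int))) := rfl
    rw [this] at hmp
    rw [hc]
    exact hmp
  exact PySem.List.sorted_eq_of_perm_of_pairwise_lt items (groupRuns L) (fun p => p.1) hGperm h3
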